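-- pv_equiv track=rewrite | github.com/darrenoakey/noveliser2 | src/write_section.py | _clean_narrative
-- ===== SOURCE A (Python) =====
-- def _clean_narrative(text: str) -> str:
--     lines = text.split("\n")
--     skip_prefixes = ("i'll ", "i will ", "here's ", "here is ", "continuing ", "let me ")
--     cleaned = []
--     skipping = True
--     for line in lines:
--         lower = line.strip().lower()
--         if skipping and (not lower or any(lower.startswith(p) for p in skip_prefixes)):
--             continue
--         skipping = False
--         cleaned.append(line)
--     return "\n".join(cleaned) if cleaned else text
-- ===== SOURCE B (Python) =====
-- def _clean_narrative(text: str) -> str: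
--     lines = text.split("\n")
--     skip_prefixes = ("i'll ", "i will ", "here's ", "here is ", "continuing ", "let me ")
--
--     def _is_filler(line):
--         lower = line.strip().lower()
--         return not lower or any(lower.startswith(p) for p in skip_prefixes)
--
--     idx = next((i for i, line in enumerate(lines) if not _is_filler(line)), None)
--     return "\n".join(lines[idx:]) if idx is not None else text
-- ===== Notes on version B (the rewrite author's own statement) =====
-- stated objective: simpler
-- what changed: Replaces the stateful skipping-flag accumulation loop with a two-phase structure: find the index of the first non-filler line, then slice and join the tail (falling back to the original text when every line is filler).
import Mathlib
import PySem

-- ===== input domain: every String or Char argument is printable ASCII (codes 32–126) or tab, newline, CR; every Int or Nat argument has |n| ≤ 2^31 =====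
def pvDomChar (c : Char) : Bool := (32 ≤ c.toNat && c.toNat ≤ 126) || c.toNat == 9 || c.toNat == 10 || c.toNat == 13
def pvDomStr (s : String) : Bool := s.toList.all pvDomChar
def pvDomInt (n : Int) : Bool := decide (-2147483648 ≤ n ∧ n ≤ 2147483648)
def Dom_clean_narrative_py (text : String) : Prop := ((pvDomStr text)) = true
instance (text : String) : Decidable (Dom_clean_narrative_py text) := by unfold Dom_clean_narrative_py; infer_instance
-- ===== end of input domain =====

-- B replaces A's stateful skipping-flag accumulation loop with find-first-non-filler-index then slice (simpler decomposition, same cost).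

-- ===== PORT A =====
-- port of A's stateful loop: state = (cleaned, skipping); split("\n") has sep ≠ "" so split? is always some (getD never takes its default)
def clean_narrative_py (text : String) : String :=
  let lines := (PySem.Str.split? text "\n").getD [text]
  let skip_prefixes := ["i'll ", "i will ", "here's ", "here is ", "continuing ", "let me "]
  let r := lines.foldl (fun (st : List String × Bool) line =>
      let lower := PySem.Str.lower (PySem.Str.strip line)
      if st.2 && (lower == "" || skip_prefixes.any (fun p => PySem.Str.startswith lower p)) then
        st
      else
        (st.1 ++ [line], false)) ([], true)
  if r.1 = [] then text else PySem.Str.join "\n" r.1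

-- ===== PORT B =====
-- B's helper _is_filler
def pvIsFiller (line : String) : Bool :=
  let lower := PySem.Str.lower (PySem.Str.strip line)
  lower == "" || (["i'll ", "i will ", "here's ", "here is ", "continuing ", "let me "].any
      (fun p => PySem.Str.startswith lower p))

-- next((i for i, line in enumerate(lines) if not _is_filler(line)), None) → findIdx?; lines[idx:] → slice
def clean_narrative_py_alt (text : String) : String :=
  let lines := (PySem.Str.split? text "\n").getD [text]
  match lines.findIdx? (fun l => !pvIsFiller l) with
  | some i => PySem.Str.join "\n" (PySem.List.slice lines (some (i : Int)) none)
  | none => text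

-- ===== PRECONDITION & SPEC =====
def Spec_clean_narrative_py (text : String) (out : String) : Prop := out = clean_narrative_py_alt text
instance (text : String) (out : String) : Decidable (Spec_clean_narrative_py text out) := by unfold Spec_clean_narrative_py; infer_instance

-- ===== CLAIM (what is proved, stated in full; the proofs are below) =====
def Claim_equal_clean_narrative_py : Prop := ∀ (text : String), Dom_clean_narrative_py text → Spec_clean_narrative_py text (clean_narrative_py text)

-- ===== LEMMAS AND PROOFS =====
-- A's loop body, rephrased through pvIsFiller
def pvStepA (st : List String × Bool) (line : String) : List String × Bool :=
  if st.2 && pvIsFiller line then st else (st.1 ++ [line], false)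

theorem pvStepA_eq :
    (fun (st : List String × Bool) line =>
      let lower := PySem.Str.lower (PySem.Str.strip line)
      if st.2 && (lower == "" || (["i'll ", "i will ", "here's ", "here is ", "continuing ", "let me "] : List String).any (fun p => PySem.Str.startswith lower p)) then
        st
      else
        (st.1 ++ [line], false)) = pvStepA := by
  funext st line
  simp [pvStepA, pvIsFiller]

theorem foldl_pvStepA_false (ls : List String) (acc : List String) :
    ls.foldl pvStepA (acc, false) = (acc ++ ls, false) := by
  induction ls generalizing acc with
  | nil => simp
  | cons x xs ih => simp [pvStepA, ih]

theorem foldl_pvStepA_true (ls : List String) (acc : List String) :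
    ls.foldl pvStepA (acc, true) =
      (acc ++ ls.dropWhile pvIsFiller, (ls.dropWhile pvIsFiller).isEmpty) := by
  induction ls generalizing acc with
  | nil => simp
  | cons x xs ih =>
    by_cases h : pvIsFiller x
    · simp [pvStepA, h, ih]
    · simp [pvStepA, h, foldl_pvStepA_false]

theorem drop_findIdx_eq_dropWhile (ls : List String) (i : Nat)
    (h : ls.findIdx? (fun l => !pvIsFiller l) = some i) :
    ls.drop i = ls.dropWhile pvIsFiller := by
  induction ls generalizing i with
  | nil => simp at h
  | cons x xs ih =>
    rw [List.findIdx?_cons] at h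
    by_cases hx : pvIsFiller x
    · simp [hx] at h
      obtain ⟨j, hj, hji⟩ := h
      subst hji
      simpa [List.dropWhile_cons, hx] using ih j hj
    · simp [hx] at h
      subst h
      simp [hx]

-- ===== VERDICT (by name: the statement is the Claim_ definition above) =====
theorem clean_narrative_py_spec : Claim_equal_clean_narrative_py := by
  intro text _
  show clean_narrative_py text = clean_narrative_py_alt text
  unfold clean_narrative_py clean_narrative_py_alt
  simp only [pvStepA_eq]
  set lines := (PySem.Str.split? text "\n").getD [text] with hl
  rw [foldl_pvStepA_true]
  cases h : lines.findIdx? (fun l => !pvIsFiller l) with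
  | none =>
    have hall : ∀ x ∈ lines, pvIsFiller x = true := by
      intro x hx
      have := List.findIdx?_eq_none_iff.mp h x hx
      simpa using this
    have : lines.dropWhile pvIsFiller = [] := List.dropWhile_eq_nil_iff.mpr hall
    simp [this]
  | some i =>
    have hne : lines.dropWhile pvIsFiller ≠ [] := by
      intro hnil
      have hall := List.dropWhile_eq_nil_iff.mp hnil
      have : lines.findIdx? (fun l => !pvIsFiller l) = none :=
        List.findIdx?_eq_none_iff.mpr (by intro x hx; simp [hall x hx])
      simp [this] at h
    simp [hne, PySem.List.slice_from_natCast, drop_findIdx_eq_dropWhile lines i h]
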